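-- pv_equiv track=rewrite | github.com/ajwoong/CodingTest | 프로그래머스 - 리코쳇 로봇(bfs사용).py | solution
-- ===== SOURCE A (Python) =====
-- from collections import deque
--
-- def solution(board):
--
--     for x in range(len(board)):
--         for y in range(len(board[0])):
--             if(board[x][y] == 'R'):
--                 r_point = [x,y]
--
--     visited = [[0 for _ in range(len(board[0]))] for _ in range(len(board))]
--     visited[r_point[0]][r_point[1]] = 1
--
--     dx = [0,0,1,-1]
--     dy = [1,-1,0,0]
--
--     def bfs():
--
--         q = deque()
--         q.append(r_point)
--         cnt = 0
--
--         while q: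
--             point = q.popleft()
--             x = point[0]
--             y = point[1]
--
--             for i in range(4):
--                 nx = x
--                 ny = y
--                 while (0 <= nx + dx[i] < len(board) and 0 <= ny + dy[i] < len(board[0]) and
--                        board[nx + dx[i]][ny + dy[i]] != 'D'):
--                     nx += dx[i]
--                     ny += dy[i]
--
--                 if(visited[nx][ny] == 0 and board[nx][ny] != 'G'):
--                     visited[nx][ny] = visited[x][y] + 1
--                     q.append([nx,ny])
--                 elif(visited[nx][ny] == 0 and board[nx][ny] == 'G'):
--                     visited[nx][ny] = visited[x][y]
--                     return visited[nx][ny]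
--
--         return -1
--
--     answer = bfs()
--     return (answer)
-- ===== SOURCE B (Python) =====
-- def solution(board):
--     rows, cols = len(board), len(board[0])
--
--     # locate R: last occurrence in row-major order (as A's scan leaves it)
--     cand = [(x, y) for x in range(rows) for y in range(cols) if board[x][y] == 'R']
--     sx, sy = cand[-1]
--
--     # Phase 1: per-line scans give every cell's slide destination in each of
--     # the 4 directions, with no per-cell stepping loop.
--     def fwd(line):          # destination index when sliding towards higher indices
--         n = len(line)
--         res = [0] * n
--         for i in range(n - 1, -1, -1):
--             res[i] = res[i + 1] if i + 1 < n and line[i + 1] != 'D' else i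
--         return res
--
--     def bwd(line):          # destination index when sliding towards lower indices
--         res = []
--         for i in range(len(line)):
--             res.append(res[i - 1] if i >= 1 and line[i - 1] != 'D' else i)
--         return res
--
--     rowlines = [board[x][:cols] for x in range(rows)]
--     collines = [[board[x][y] for x in range(rows)] for y in range(cols)]
--     R = [fwd(r) for r in rowlines]
--     L = [bwd(r) for r in rowlines]
--     Dn = [fwd(c) for c in collines]
--     U = [bwd(c) for c in collines]
--
--     # Phase 2: BFS level by level over the tables.
--     seen = {(sx, sy)}
--     frontier = [(sx, sy)]
--     level = 0
--     while frontier: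
--         nxt = []
--         for (x, y) in frontier:
--             for p in ((x, R[x][y]), (x, L[x][y]), (Dn[y][x], y), (U[y][x], y)):
--                 if p in seen:
--                     continue
--                 if board[p[0]][p[1]] == 'G':
--                     return level + 1
--                 seen.add(p)
--                 nxt.append(p)
--         frontier = nxt
--         level += 1
--     return -1
-- ===== Notes on version B (the rewrite author's own statement) =====
-- stated objective: faster
-- what changed: A re-runs a step-by-step slide-to-wall loop for every cell dequeued in its BFS over a 2D visited-count grid; B precomputes all slide destinations with four per-row/per-column linear scans (no per-cell stepping) and then runs a level-by-level BFS over those tables with a seen-set and an explicit level counter.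
import Mathlib
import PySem

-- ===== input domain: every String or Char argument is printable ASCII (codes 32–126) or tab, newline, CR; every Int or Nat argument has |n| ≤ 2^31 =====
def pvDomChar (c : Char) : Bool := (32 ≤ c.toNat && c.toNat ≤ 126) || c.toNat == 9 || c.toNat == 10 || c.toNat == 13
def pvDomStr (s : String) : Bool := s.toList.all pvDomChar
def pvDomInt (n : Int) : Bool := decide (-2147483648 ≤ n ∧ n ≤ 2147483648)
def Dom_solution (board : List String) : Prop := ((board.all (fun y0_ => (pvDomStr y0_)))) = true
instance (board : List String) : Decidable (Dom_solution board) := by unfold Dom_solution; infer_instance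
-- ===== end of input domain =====

-- B replaces A's slide-inside-BFS over a visited grid by two phases: four per-line
-- scans precompute every cell's slide destinations, then a level-by-level BFS walks
-- those tables (objective: faster — no per-cell slide loop).

-- ===== PORT A =====

-- board[x][y]; inside Pre_ every access is in range, so the default is never returned
def cellA (board : List String) (x y : Nat) : Char :=
  ((board.getD x "").toList.getD y ' ')

-- the inner while loop; fuel rows+cols bounds the ≤ max(rows,cols) slide steps.
-- the guard ensures nx+dx, ny+dy ≥ 0, so .toNat is exact here
def slideA (board : List String) (rows cols : Nat) (ddx ddy : Int) (nx ny : Int) : Nat → Int × Int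
  | 0 => (nx, ny)
  | fuel+1 =>
    if 0 ≤ nx + ddx ∧ nx + ddx < (rows : Int) ∧ 0 ≤ ny + ddy ∧ ny + ddy < (cols : Int) ∧
        cellA board (nx + ddx).toNat (ny + ddy).toNat ≠ 'D' then
      slideA board rows cols ddx ddy (nx + ddx) (ny + ddy) fuel
    else (nx, ny)

def vget (v : List (List Int)) (x y : Nat) : Int := (v.getD x []).getD y 0
def vset (v : List (List Int)) (x y : Nat) (a : Int) : List (List Int) :=
  v.set x ((v.getD x []).set y a)

def dirsA : List (Int × Int) := [(0,1), (0,-1), (1,0), (-1,0)]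

-- the 'for i in range(4)' body, with early return ('G' found) as .inr
def stepA (board : List String) (rows cols : Nat) (x y : Nat) :
    List (Int × Int) → List (Nat × Nat) → List (List Int) →
    (List (Nat × Nat) × List (List Int)) ⊕ Int
  | [], q, v => .inl (q, v)
  | (ddx, ddy) :: rest, q, v =>
    let p := slideA board rows cols ddx ddy (x : Int) (y : Int) (rows + cols)
    let nxn := p.1.toNat
    let nyn := p.2.toNat
    if vget v nxn nyn = 0 ∧ cellA board nxn nyn ≠ 'G' then
      stepA board rows cols x y rest (q ++ [(nxn, nyn)]) (vset v nxn nyn (vget v x y + 1))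
    else if vget v nxn nyn = 0 ∧ cellA board nxn nyn = 'G' then
      .inr (vget v x y)
    else
      stepA board rows cols x y rest q v

-- the 'while q' loop; fuel rows*cols+1 bounds the ≤ rows*cols dequeues
def bfsA (board : List String) (rows cols : Nat) :
    List (Nat × Nat) → List (List Int) → Nat → Int
  | _, _, 0 => -1
  | [], _, _+1 => -1
  | (x, y) :: q', v, fuel+1 =>
    match stepA board rows cols x y dirsA q' v with
    | .inr r => r
    | .inl (q'', v') => bfsA board rows cols q'' v' fuel

def solution (board : List String) : Int :=
  let rows := board.length
  let cols := (board.headD "").toList.length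
  let rOpt := (List.range rows).foldl (fun acc x =>
      (List.range cols).foldl (fun acc y =>
        if cellA board x y = 'R' then some (x, y) else acc) acc) (none : Option (Nat × Nat))
  match rOpt with
  | none => 0   -- Python raises NameError here; excluded by Pre_solution
  | some (rx, ry) =>
    let v0 : List (List Int) :=
      (List.range rows).map (fun _ => (List.range cols).map (fun _ => (0 : Int)))
    bfsA board rows cols [(rx, ry)] (vset v0 rx ry 1) (rows * cols + 1)

-- ===== PORT B =====

-- phase 1: 'fwd' scan — res[i] = res[i+1] if i+1 < n and line[i+1] != 'D' else i,
-- built right-to-left; the head of the already-built tail is res[i+1]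
def fwdScan : List Char → Nat → List Nat
  | [], _ => []
  | _ :: rest, i =>
    (match rest, fwdScan rest (i + 1) with
     | c' :: _, t :: _ => if c' ≠ 'D' then t else i
     | _, _ => i) :: fwdScan rest (i + 1)

-- phase 1: 'bwd' scan — res.append(res[i-1] if i >= 1 and line[i-1] != 'D' else i),
-- built left-to-right carrying (res[i-1], line[i-1])
def bwdScan : List Char → Nat → Option (Nat × Char) → List Nat
  | [], _, _ => []
  | c :: rest, i, prev =>
    let d := match prev with
      | some (pd, pc) => if pc ≠ 'D' then pd else i
      | none => i
    d :: bwdScan rest (i + 1) (some (d, c))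

def rowLine (board : List String) (cols x : Nat) : List Char :=       -- board[x][:cols]
  ((board.getD x "").toList).take cols

def colLine (board : List String) (rows y : Nat) : List Char :=       -- [board[x][y] for x in range(rows)]
  (List.range rows).map (fun x => ((board.getD x "").toList).getD y ' ')

def tblR (board : List String) (rows cols : Nat) : List (List Nat) :=
  (List.range rows).map (fun x => fwdScan (rowLine board cols x) 0)
def tblL (board : List String) (rows cols : Nat) : List (List Nat) :=
  (List.range rows).map (fun x => bwdScan (rowLine board cols x) 0 none)
def tblD (board : List String) (rows cols : Nat) : List (List Nat) :=
  (List.range cols).map (fun y => fwdScan (colLine board rows y) 0)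
def tblU (board : List String) (rows cols : Nat) : List (List Nat) :=
  (List.range cols).map (fun y => bwdScan (colLine board rows y) 0 none)

def nget (t : List (List Nat)) (i j : Nat) : Nat := (t.getD i []).getD j 0

-- phase 2, inner 'for p in (…)' over the four table entries; early return as .inr
def visitNbrs (board : List String) :
    List (Nat × Nat) → List (Nat × Nat) → PySem.Set (Nat × Nat) → Int →
    (List (Nat × Nat) × PySem.Set (Nat × Nat)) ⊕ Int
  | [], nxt, seen, _ => .inl (nxt, seen)
  | p :: ps, nxt, seen, level =>
    if p ∈ seen then visitNbrs board ps nxt seen level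
    else if ((board.getD p.1 "").toList.getD p.2 ' ') = 'G' then .inr (level + 1)
    else visitNbrs board ps (nxt ++ [p]) (PySem.Set.add seen p) level

-- phase 2, 'for (x, y) in frontier'
def sweep (board : List String) (tR tL tD tU : List (List Nat)) :
    List (Nat × Nat) → List (Nat × Nat) → PySem.Set (Nat × Nat) → Int →
    (List (Nat × Nat) × PySem.Set (Nat × Nat)) ⊕ Int
  | [], nxt, seen, _ => .inl (nxt, seen)
  | (x, y) :: rest, nxt, seen, level =>
    match visitNbrs board
        [(x, nget tR x y), (x, nget tL x y), (nget tD y x, y), (nget tU y x, y)]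
        nxt seen level with
    | .inr r => .inr r
    | .inl (nxt', seen') => sweep board tR tL tD tU rest nxt' seen' level

-- phase 2, 'while frontier'; fuel rows*cols+1 bounds the number of levels
def levels (board : List String) (tR tL tD tU : List (List Nat)) :
    List (Nat × Nat) → PySem.Set (Nat × Nat) → Int → Nat → Int
  | _, _, _, 0 => -1
  | [], _, _, _+1 => -1
  | p :: fr, seen, level, fuel+1 =>
    match sweep board tR tL tD tU (p :: fr) [] seen level with
    | .inr r => r
    | .inl (nxt, seen') => levels board tR tL tD tU nxt seen' (level + 1) fuel

def solution_alt (board : List String) : Int :=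
  let rows := board.length
  let cols := (board.headD "").toList.length
  let cand := (List.range rows).flatMap (fun x =>
    (List.range cols).filterMap (fun y =>
      if ((board.getD x "").toList.getD y ' ') = 'R' then some (x, y) else none))
  match cand.getLast? with
  | none => 0   -- Python raises IndexError on cand[-1]; excluded by Pre_solution
  | some (sx, sy) =>
    levels board (tblR board rows cols) (tblL board rows cols)
      (tblD board rows cols) (tblU board rows cols)
      [(sx, sy)] (PySem.Set.ofList [(sx, sy)]) 0 (rows * cols + 1)

-- ===== PRECONDITION & SPEC =====

-- Pre_: exactly where Python A returns: a nonempty board whose rows all reach the first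
-- row's width (else IndexError in the scan) and with an 'R' in the scanned region
-- (else NameError on r_point)
def Pre_solution (board : List String) : Prop :=
  board ≠ [] ∧
  (∀ s ∈ board, (board.headD "").toList.length ≤ s.toList.length) ∧
  ∃ s ∈ board, 'R' ∈ s.toList.take (board.headD "").toList.length

instance (board : List String) : Decidable (Pre_solution board) := by
  unfold Pre_solution; infer_instance

def pvWitness_solution : List String := ["RG"]

def Spec_solution (board : List String) (out : Int) : Prop := out = solution_alt board
instance (board : List String) (out : Int) : Decidable (Spec_solution board out) := by
  unfold Spec_solution; infer_instance

-- ===== CLAIM (what is proved, stated in full; the proofs are below) =====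
def Claim_equal_solution : Prop := ∀ (board : List String), Dom_solution board → Pre_solution board → Spec_solution board (solution board)

-- ===== LEMMAS AND PROOFS =====

theorem cellA_def (board : List String) (x y : Nat) :
    cellA board x y = ((board.getD x "").toList.getD y ' ') := rfl

-- ---- generic list lemmas for locating the last 'R' ----

theorem foldl_or_last {α β : Type} (l : List α) (f : α → Option β) (acc : Option β) :
    l.foldl (fun a x => (f x).or a) acc = (l.filterMap f).getLast?.or acc := by
  induction l generalizing acc with
  | nil => rfl
  | cons x l ih =>
    simp only [List.foldl_cons, List.filterMap_cons, ih]
    cases h : f x with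
    | none => rfl
    | some v =>
      rw [List.getLast?_cons]
      cases (l.filterMap f).getLast? <;> rfl

theorem getLast?_filterMap_getLast? {α β : Type} (l : List α) (g : α → List β) :
    (l.filterMap (fun x => (g x).getLast?)).getLast? = (l.flatMap g).getLast? := by
  induction l with
  | nil => rfl
  | cons x l ih =>
    simp only [List.filterMap_cons, List.flatMap_cons, List.getLast?_append]
    cases h : (g x).getLast? with
    | none =>
      simp [ih]
    | some v =>
      rw [List.getLast?_cons, ih]
      cases (l.flatMap g).getLast? <;> rfl

theorem foldl_if_last {α β : Type} (l : List α) (p : α → Prop) [DecidablePred p] (g : α → β)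
    (acc : Option β) :
    l.foldl (fun a x => if p x then some (g x) else a) acc =
      (l.filterMap (fun x => if p x then some (g x) else none)).getLast?.or acc := by
  have hf : (fun (a : Option β) x => if p x then some (g x) else a) =
      (fun a x => ((fun x => if p x then some (g x) else none) x).or a) := by
    funext a x
    by_cases hpx : p x <;> simp [hpx]
  rw [hf, foldl_or_last]

-- ---- visited-grid access lemmas (A side) ----

theorem vset_length (v : List (List Int)) (x y : Nat) (a : Int) :
    (vset v x y a).length = v.length := by
  simp [vset]

theorem vset_rows (v : List (List Int)) (x y : Nat) (a : Int) (cols : Nat)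
    (h : ∀ row ∈ v, row.length = cols) :
    ∀ row ∈ vset v x y a, row.length = cols := by
  intro row hrow
  by_cases hx : x < v.length
  · rcases List.mem_or_eq_of_mem_set hrow with h1 | h1
    · exact h _ h1
    · subst h1
      rw [List.length_set]
      exact h _ (by rw [List.getD_eq_getElem?_getD, List.getElem?_eq_getElem hx]; exact List.getElem_mem hx)
  · simp only [vset] at hrow
    rw [List.set_eq_of_length_le (by omega)] at hrow
    exact h _ hrow

theorem vget_eq (v : List (List Int)) (x y : Nat) :
    vget v x y = ((v[x]?.getD [])[y]?).getD 0 := by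
  simp [vget, List.getD_eq_getElem?_getD]

theorem vget_vset_self (v : List (List Int)) (x y : Nat) (a : Int)
    (hx : x < v.length) (hy : y < (v.getD x []).length) :
    vget (vset v x y a) x y = a := by
  rw [vget_eq]; simp only [vset]; rw [ List.getElem?_set_self (by simpa using hx)]
  rw [List.getD_eq_getElem?_getD] at hy ⊢
  simp only [Option.getD_some]
  rw [List.getElem?_set_self (by simpa using hy)]
  rfl

theorem vget_vset_ne (v : List (List Int)) (x y a b : Nat) (val : Int)
    (h : x ≠ a ∨ y ≠ b) :
    vget (vset v x y val) a b = vget v a b := by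
  by_cases hxa : x = a
  · subst hxa
    have hyb : y ≠ b := h.resolve_left (by simp)
    by_cases hx : x < v.length
    · rw [vget_eq, vget_eq]; simp only [vset]; rw [ List.getElem?_set_self (by simpa using hx),
        List.getElem?_eq_getElem hx]
      simp only [Option.getD_some]
      rw [List.getElem?_set_ne hyb, List.getD_eq_getElem?_getD, List.getElem?_eq_getElem hx]
      rfl
    · simp only [vset]; rw [List.set_eq_of_length_le (by omega)]
  · rw [vget_eq, vget_eq]; simp only [vset]; rw [List.getElem?_set_ne hxa]

theorem vget_init (rows cols x y : Nat) :
    vget ((List.range rows).map (fun _ => (List.range cols).map (fun _ => (0 : Int)))) x y = 0 := by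
  by_cases hx : x < rows
  · rw [vget_eq, List.getElem?_map, List.getElem?_range hx]
    simp only [Option.map_some, Option.getD_some, List.getElem?_map]
    by_cases hy : y < cols
    · rw [List.getElem?_range hy]; rfl
    · rw [List.getElem?_eq_none (l := List.range cols) (i := y) (by rw [List.length_range]; omega)]; rfl
  · rw [vget_eq, List.getElem?_eq_none
      (l := (List.range rows).map (fun _ => (List.range cols).map (fun _ => (0 : Int)))) (i := x)
      (by rw [List.length_map, List.length_range]; omega)]
    rfl

theorem slide_bounds (board : List String) (rows cols : Nat) (ddx ddy : Int) (fuel : Nat)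
    (nx ny : Int) (h1 : 0 ≤ nx) (h2 : nx < (rows : Int)) (h3 : 0 ≤ ny) (h4 : ny < (cols : Int)) :
    0 ≤ (slideA board rows cols ddx ddy nx ny fuel).1 ∧
    (slideA board rows cols ddx ddy nx ny fuel).1 < (rows : Int) ∧
    0 ≤ (slideA board rows cols ddx ddy nx ny fuel).2 ∧
    (slideA board rows cols ddx ddy nx ny fuel).2 < (cols : Int) := by
  induction fuel generalizing nx ny with
  | zero => exact ⟨h1, h2, h3, h4⟩
  | succ fuel ih =>
    rw [slideA]
    split
    · next hcond => exact ih _ _ hcond.1 hcond.2.1 hcond.2.2.1 hcond.2.2.2.1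
    · exact ⟨h1, h2, h3, h4⟩

-- ---- line-slide recurrences (proof-only characterisations of the scans) ----

def lsF (l : List Char) : Nat → Nat → Nat
  | 0, y => y
  | f+1, y =>
    if y + 1 < l.length ∧ l.getD (y+1) ' ' ≠ 'D' then lsF l f (y+1) else y

def lsB (l : List Char) : Nat → Nat → Nat
  | 0, y => y
  | f+1, y =>
    if 1 ≤ y ∧ l.getD (y-1) ' ' ≠ 'D' then lsB l f (y-1) else y

theorem lsF_succ (l : List Char) : ∀ (f y : Nat), l.length ≤ y + 1 + f →
    lsF l (f+1) y = lsF l f y := by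
  intro f
  induction f with
  | zero =>
    intro y h
    simp only [lsF]
    rw [if_neg (by omega)]
  | succ f ih =>
    intro y h
    by_cases hc : y + 1 < l.length ∧ l.getD (y+1) ' ' ≠ 'D'
    · show lsF l (f+1+1) y = lsF l (f+1) y
      rw [lsF, if_pos hc, ih (y+1) (by omega), lsF, if_pos hc]
    · show lsF l (f+1+1) y = lsF l (f+1) y
      rw [lsF, if_neg hc, lsF, if_neg hc]

theorem lsF_of_le (l : List Char) (y f g : Nat) (hf : l.length ≤ y + 1 + f) (hg : f ≤ g) :
    lsF l g y = lsF l f y := by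
  obtain ⟨k, rfl⟩ := Nat.le.dest hg
  clear hg
  induction k with
  | zero => rfl
  | succ k ih =>
    have h1 : f + (k + 1) = (f + k) + 1 := by omega
    rw [h1, lsF_succ l (f+k) y (by omega), ih]

theorem lsB_succ (l : List Char) : ∀ (f y : Nat), y ≤ f →
    lsB l (f+1) y = lsB l f y := by
  intro f
  induction f with
  | zero =>
    intro y h
    have hy : y = 0 := by omega
    subst hy
    simp only [lsB]
    rw [if_neg (by omega)]
  | succ f ih =>
    intro y h
    by_cases hc : 1 ≤ y ∧ l.getD (y-1) ' ' ≠ 'D'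
    · show lsB l (f+1+1) y = lsB l (f+1) y
      rw [lsB, if_pos hc, ih (y-1) (by omega), lsB, if_pos hc]
    · show lsB l (f+1+1) y = lsB l (f+1) y
      rw [lsB, if_neg hc, lsB, if_neg hc]

theorem lsB_of_le (l : List Char) (y f g : Nat) (hf : y ≤ f) (hg : f ≤ g) :
    lsB l g y = lsB l f y := by
  obtain ⟨k, rfl⟩ := Nat.le.dest hg
  clear hg
  induction k with
  | zero => rfl
  | succ k ih =>
    have h1 : f + (k + 1) = (f + k) + 1 := by omega
    rw [h1, lsB_succ l (f+k) y (by omega), ih]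

theorem lsF_cons (c : Char) (l : List Char) : ∀ (f y : Nat),
    lsF (c :: l) f (y+1) = lsF l f y + 1 := by
  intro f
  induction f with
  | zero => intro y; rfl
  | succ f ih =>
    intro y
    have hg : (c :: l).getD (y+1+1) ' ' = l.getD (y+1) ' ' := List.getD_cons_succ
    by_cases hc : y + 1 < l.length ∧ l.getD (y+1) ' ' ≠ 'D'
    · rw [lsF, if_pos (by rw [List.length_cons, hg]; exact ⟨by omega, hc.2⟩), ih, lsF, if_pos hc]
    · rw [lsF, if_neg (by rw [List.length_cons, hg]; intro h; exact hc ⟨by omega, h.2⟩), lsF, if_neg hc]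

theorem fwdScan_length : ∀ (l : List Char) (i : Nat), (fwdScan l i).length = l.length := by
  intro l
  induction l with
  | nil => intro i; rfl
  | cons c rest ih =>
    intro i
    simp only [fwdScan, List.length_cons]
    rw [ih]

theorem fwdScan_getD : ∀ (l : List Char) (i j : Nat), j < l.length →
    (fwdScan l i).getD j 0 = i + lsF l l.length j := by
  intro l
  induction l with
  | nil => intro i j h; simp at h
  | cons c rest ih =>
    intro i j hj
    cases j with
    | zero =>
      cases rest with
      | nil => simp [fwdScan, lsF]
      | cons c' r' =>
        have hlen : (fwdScan (c' :: r') (i+1)).length = (c' :: r').length := fwdScan_length _ _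
        cases htail : fwdScan (c' :: r') (i+1) with
        | nil => rw [htail] at hlen; simp at hlen
        | cons t ts =>
          have h0 : (fwdScan (c' :: r') (i+1)).getD 0 0 =
              (i+1) + lsF (c' :: r') (c' :: r').length 0 := ih (i+1) 0 (by simp)
          rw [htail] at h0
          simp only [List.getD_cons_zero] at h0
          have hexp : fwdScan (c :: c' :: r') i = (if c' ≠ 'D' then t else i) :: t :: ts := by
            rw [fwdScan.eq_def]
            simp only [htail]
          rw [hexp]
          simp only [List.getD_cons_zero, List.length_cons]
          rw [lsF]
          have hg1 : (c :: c' :: r').getD (0+1) ' ' = c' := rfl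
          by_cases hD : c' ≠ 'D'
          · rw [if_pos hD, if_pos (by rw [hg1]; exact ⟨by simp, hD⟩)]
            have hsh : lsF (c :: c' :: r') (r'.length + 1) (0+1) =
                lsF (c' :: r') (r'.length + 1) 0 + 1 := lsF_cons c (c' :: r') _ 0
            rw [hsh, h0]
            simp only [List.length_cons] at *
            omega
          · rw [if_neg hD, if_neg (by rw [hg1]; intro h; exact hD h.2)]
            omega
    | succ j =>
      have hlhs : (fwdScan (c :: rest) i).getD (j+1) 0 =
          (fwdScan rest (i+1)).getD j 0 := by
        simp only [fwdScan, List.getD_cons_succ]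
      rw [hlhs, ih (i+1) j (by simpa using hj)]
      simp only [List.length_cons]
      rw [lsF_cons c rest (rest.length + 1) j,
        lsF_succ rest rest.length j (by omega)]
      omega

def PrevOK (L : List Char) (i : Nat) : Option (Nat × Char) → Prop
  | none => i = 0
  | some (pd, pc) => 1 ≤ i ∧ L.getD (i-1) ' ' = pc ∧ pd = lsB L L.length (i-1)

def bwdHead (i : Nat) : Option (Nat × Char) → Nat
  | some (pd, pc) => if pc ≠ 'D' then pd else i
  | none => i

theorem bwdScan_cons (c : Char) (rest : List Char) (i : Nat) (prev : Option (Nat × Char)) :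
    bwdScan (c :: rest) i prev = bwdHead i prev :: bwdScan rest (i+1) (some (bwdHead i prev, c)) := by
  cases prev with
  | none => rfl
  | some pdc => obtain ⟨pd, pc⟩ := pdc; rfl

theorem bwdScan_getD (L : List Char) : ∀ (l pre : List Char) (prev : Option (Nat × Char)) (j : Nat),
    L = pre ++ l → PrevOK L pre.length prev → j < l.length →
    (bwdScan l pre.length prev).getD j 0 = lsB L L.length (pre.length + j) := by
  intro l
  induction l with
  | nil => intro pre prev j _ _ h; simp at h
  | cons c rest ih =>
    intro pre prev j hL hOK hj
    have hiL : pre.length < L.length := by rw [hL]; simp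
    have hcL : L.getD pre.length ' ' = c := by
      rw [hL, List.getD_eq_getElem?_getD, List.getElem?_append_right (le_refl _)]
      simp
    obtain ⟨Lf, hLf⟩ : ∃ Lf, L.length = Lf + 1 := ⟨L.length - 1, by omega⟩
    have hd : bwdHead pre.length prev = lsB L L.length (pre.length) := by
      cases prev with
      | none =>
        have h0 : pre.length = 0 := hOK
        show pre.length = lsB L L.length pre.length
        rw [h0, hLf, lsB, if_neg (by omega)]
      | some pdc =>
        obtain ⟨pd, pc⟩ := pdc
        obtain ⟨h1, h2, h3⟩ := hOK
        show (if pc ≠ 'D' then pd else pre.length) = lsB L L.length pre.length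
        rw [hLf, lsB]
        by_cases hD : pc ≠ 'D'
        · rw [if_pos hD, if_pos ⟨h1, by rw [h2]; exact hD⟩, h3, hLf,
            lsB_succ L Lf (pre.length - 1) (by omega)]
        · simp only [not_not] at hD
          rw [if_neg (by simp [hD]), if_neg (fun h => h.2 (by rw [h2, hD]))]
    cases j with
    | zero =>
      rw [bwdScan_cons]
      simp only [List.getD_cons_zero]
      rw [hd]
      congr 1
    | succ j =>
      rw [bwdScan_cons]
      simp only [List.getD_cons_succ]
      have hpre' : (pre ++ [c]).length = pre.length + 1 := by simp
      have hres := ih (pre ++ [c]) (some (bwdHead pre.length prev, c)) j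
        (by rw [hL]; simp)
        (by
          refine ⟨by simp, ?_, ?_⟩
          · rw [hpre']
            simpa using hcL
          · rw [hpre']
            simpa using hd)
        (by simpa using hj)
      rw [hpre'] at hres
      rw [hres]
      congr 1
      omega

-- ---- the four slide directions as line slides ----

theorem rowLine_getD (board : List String) (cols x j : Nat) (hj : j < cols) :
    (rowLine board cols x).getD j ' ' = cellA board x j := by
  simp only [rowLine, cellA, List.getD_eq_getElem?_getD, List.getElem?_take_of_lt hj]

theorem colLine_getD (board : List String) (rows y i : Nat) (hi : i < rows) :
    (colLine board rows y).getD i ' ' = cellA board i y := by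
  rw [colLine, cellA, List.getD_eq_getElem?_getD, List.getElem?_map, List.getElem?_range hi]
  rfl

theorem slideA_right (board : List String) (rows cols : Nat) (x : Nat)
    (hx : x < rows) (hl : (rowLine board cols x).length = cols) :
    ∀ (fuel : Nat) (y : Nat), y < cols →
    slideA board rows cols 0 1 (x : Int) (y : Int) fuel =
      ((x : Int), (lsF (rowLine board cols x) fuel y : Int)) := by
  intro fuel
  induction fuel with
  | zero => intro y hy; rfl
  | succ fuel ih =>
    intro y hy
    have e1 : ((x : Int) + 0) = (x : Int) := by ring
    have e2 : ((y : Int) + 1) = ((y + 1 : Nat) : Int) := by push_cast; ring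
    rw [slideA, lsF, hl]
    simp only [e1, e2, Int.toNat_natCast]
    by_cases hyc : y + 1 < cols
    · have hcg : (rowLine board cols x).getD (y+1) ' ' = cellA board x (y+1) :=
        rowLine_getD board cols x (y+1) hyc
      by_cases hD : cellA board x (y+1) ≠ 'D'
      · rw [if_pos ⟨Int.natCast_nonneg x, by exact_mod_cast hx, Int.natCast_nonneg (y+1),
          by exact_mod_cast hyc, hD⟩, if_pos ⟨hyc, by rw [hcg]; exact hD⟩]
        exact ih (y+1) hyc
      · rw [if_neg (by rintro ⟨-, -, -, -, h5⟩; exact hD h5),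
          if_neg (by rintro ⟨-, h5⟩; rw [hcg] at h5; exact hD h5)]
    · rw [if_neg (by rintro ⟨-, -, -, h4, -⟩; exact hyc (by exact_mod_cast h4)),
        if_neg (by rintro ⟨h4, -⟩; exact hyc h4)]

theorem slideA_left (board : List String) (rows cols : Nat) (x : Nat)
    (hx : x < rows) (_hl : (rowLine board cols x).length = cols) :
    ∀ (fuel : Nat) (y : Nat), y < cols →
    slideA board rows cols 0 (-1) (x : Int) (y : Int) fuel =
      ((x : Int), (lsB (rowLine board cols x) fuel y : Int)) := by
  intro fuel
  induction fuel with
  | zero => intro y hy; rfl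
  | succ fuel ih =>
    intro y hy
    have e1 : ((x : Int) + 0) = (x : Int) := by ring
    rw [slideA, lsB]
    by_cases h1 : 1 ≤ y
    · have e2 : ((y : Int) + (-1)) = ((y - 1 : Nat) : Int) := by omega
      simp only [e1, e2, Int.toNat_natCast]
      have hcg : (rowLine board cols x).getD (y-1) ' ' = cellA board x (y-1) :=
        rowLine_getD board cols x (y-1) (by omega)
      by_cases hD : cellA board x (y-1) ≠ 'D'
      · rw [if_pos ⟨Int.natCast_nonneg x, by exact_mod_cast hx, Int.natCast_nonneg (y-1),
          by exact_mod_cast (by omega : y - 1 < cols), hD⟩,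
          if_pos ⟨h1, by rw [hcg]; exact hD⟩]
        exact ih (y-1) (by omega)
      · rw [if_neg (by rintro ⟨-, -, -, -, h5⟩; exact hD h5),
          if_neg (by rintro ⟨-, h5⟩; rw [hcg] at h5; exact hD h5)]
    · rw [if_neg (by rintro ⟨-, -, h3, -, -⟩; omega),
        if_neg (by rintro ⟨h3, -⟩; omega)]

theorem slideA_down (board : List String) (rows cols : Nat) (y : Nat) (hy : y < cols) :
    ∀ (fuel : Nat) (x : Nat), x < rows →
    slideA board rows cols 1 0 (x : Int) (y : Int) fuel =
      ((lsF (colLine board rows y) fuel x : Int), (y : Int)) := by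
  have hcl : (colLine board rows y).length = rows := by simp [colLine]
  intro fuel
  induction fuel with
  | zero => intro x hx; rfl
  | succ fuel ih =>
    intro x hx
    have e1 : ((y : Int) + 0) = (y : Int) := by ring
    have e2 : ((x : Int) + 1) = ((x + 1 : Nat) : Int) := by push_cast; ring
    rw [slideA, lsF, hcl]
    simp only [e1, e2, Int.toNat_natCast]
    by_cases hxr : x + 1 < rows
    · have hcg : (colLine board rows y).getD (x+1) ' ' = cellA board (x+1) y :=
        colLine_getD board rows y (x+1) hxr
      by_cases hD : cellA board (x+1) y ≠ 'D'
      · rw [if_pos ⟨Int.natCast_nonneg (x+1), by exact_mod_cast hxr, Int.natCast_nonneg y,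
          by exact_mod_cast hy, hD⟩, if_pos ⟨hxr, by rw [hcg]; exact hD⟩]
        exact ih (x+1) hxr
      · rw [if_neg (by rintro ⟨-, -, -, -, h5⟩; exact hD h5),
          if_neg (by rintro ⟨-, h5⟩; rw [hcg] at h5; exact hD h5)]
    · rw [if_neg (by rintro ⟨-, h2, -, -, -⟩; exact hxr (by exact_mod_cast h2)),
        if_neg (by rintro ⟨h2, -⟩; exact hxr h2)]

theorem slideA_up (board : List String) (rows cols : Nat) (y : Nat) (hy : y < cols) :
    ∀ (fuel : Nat) (x : Nat), x < rows →
    slideA board rows cols (-1) 0 (x : Int) (y : Int) fuel =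
      ((lsB (colLine board rows y) fuel x : Int), (y : Int)) := by
  intro fuel
  induction fuel with
  | zero => intro x hx; rfl
  | succ fuel ih =>
    intro x hx
    have e1 : ((y : Int) + 0) = (y : Int) := by ring
    rw [slideA, lsB]
    by_cases h1 : 1 ≤ x
    · have e2 : ((x : Int) + (-1)) = ((x - 1 : Nat) : Int) := by omega
      simp only [e1, e2, Int.toNat_natCast]
      have hcg : (colLine board rows y).getD (x-1) ' ' = cellA board (x-1) y :=
        colLine_getD board rows y (x-1) (by omega)
      by_cases hD : cellA board (x-1) y ≠ 'D'
      · rw [if_pos ⟨Int.natCast_nonneg (x-1), by exact_mod_cast (by omega : x - 1 < rows),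
          Int.natCast_nonneg y, by exact_mod_cast hy, hD⟩,
          if_pos ⟨h1, by rw [hcg]; exact hD⟩]
        exact ih (x-1) (by omega)
      · rw [if_neg (by rintro ⟨-, -, -, -, h5⟩; exact hD h5),
          if_neg (by rintro ⟨-, h5⟩; rw [hcg] at h5; exact hD h5)]
    · rw [if_neg (by rintro ⟨h2, -, -, -, -⟩; omega),
        if_neg (by rintro ⟨h3, -⟩; omega)]

-- ---- the tables hold exactly A's slide destinations ----

def nbrF (board : List String) (rows cols x y : Nat) (d : Int × Int) : Nat × Nat :=
  ((slideA board rows cols d.1 d.2 (x : Int) (y : Int) (rows + cols)).1.toNat,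
   (slideA board rows cols d.1 d.2 (x : Int) (y : Int) (rows + cols)).2.toNat)

theorem nbrs_eq (board : List String) (rows cols : Nat)
    (hP : ∀ x, x < rows → cols ≤ (board.getD x "").toList.length)
    (x y : Nat) (hx : x < rows) (hy : y < cols) :
    [(x, nget (tblR board rows cols) x y), (x, nget (tblL board rows cols) x y),
     (nget (tblD board rows cols) y x, y), (nget (tblU board rows cols) y x, y)] =
      dirsA.map (nbrF board rows cols x y) := by
  have hrl : (rowLine board cols x).length = cols := by
    simp only [rowLine, List.length_take]
    have := hP x hx; omega
  have hcl : (colLine board rows y).length = rows := by simp [colLine]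
  have hgetR : nget (tblR board rows cols) x y = lsF (rowLine board cols x) cols y := by
    have ho : (tblR board rows cols).getD x [] = fwdScan (rowLine board cols x) 0 := by
      rw [tblR, List.getD_eq_getElem?_getD, List.getElem?_map, List.getElem?_range hx]; rfl
    rw [nget, ho, fwdScan_getD _ 0 y (by omega), hrl]
    omega
  have hgetL : nget (tblL board rows cols) x y = lsB (rowLine board cols x) cols y := by
    have ho : (tblL board rows cols).getD x [] = bwdScan (rowLine board cols x) 0 none := by
      rw [tblL, List.getD_eq_getElem?_getD, List.getElem?_map, List.getElem?_range hx]; rfl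
    have hb := bwdScan_getD (rowLine board cols x) (rowLine board cols x) [] none y rfl rfl
      (by omega)
    simp only [List.length_nil, Nat.zero_add] at hb
    rw [nget, ho, hb, hrl]
  have hgetD : nget (tblD board rows cols) y x = lsF (colLine board rows y) rows x := by
    have ho : (tblD board rows cols).getD y [] = fwdScan (colLine board rows y) 0 := by
      rw [tblD, List.getD_eq_getElem?_getD, List.getElem?_map, List.getElem?_range hy]; rfl
    rw [nget, ho, fwdScan_getD _ 0 x (by omega), hcl]
    omega
  have hgetU : nget (tblU board rows cols) y x = lsB (colLine board rows y) rows x := by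
    have ho : (tblU board rows cols).getD y [] = bwdScan (colLine board rows y) 0 none := by
      rw [tblU, List.getD_eq_getElem?_getD, List.getElem?_map, List.getElem?_range hy]; rfl
    have hb := bwdScan_getD (colLine board rows y) (colLine board rows y) [] none x rfl rfl
      (by omega)
    simp only [List.length_nil, Nat.zero_add] at hb
    rw [nget, ho, hb, hcl]
  simp only [dirsA, List.map_cons, List.map_nil]
  have h1 : nbrF board rows cols x y (0, 1) = (x, nget (tblR board rows cols) x y) := by
    rw [nbrF]
    rw [slideA_right board rows cols x hx hrl (rows + cols) y hy]
    simp only [Int.toNat_natCast]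
    rw [hgetR, lsF_of_le _ y cols (rows + cols) (by omega) (by omega)]
  have h2 : nbrF board rows cols x y (0, -1) = (x, nget (tblL board rows cols) x y) := by
    rw [nbrF]
    rw [slideA_left board rows cols x hx hrl (rows + cols) y hy]
    simp only [Int.toNat_natCast]
    rw [hgetL, lsB_of_le _ y cols (rows + cols) (by omega) (by omega)]
  have h3 : nbrF board rows cols x y (1, 0) = (nget (tblD board rows cols) y x, y) := by
    rw [nbrF]
    rw [slideA_down board rows cols y hy (rows + cols) x hx]
    simp only [Int.toNat_natCast]
    rw [hgetD, lsF_of_le _ x rows (rows + cols) (by omega) (by omega)]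
  have h4 : nbrF board rows cols x y (-1, 0) = (nget (tblU board rows cols) y x, y) := by
    rw [nbrF]
    rw [slideA_up board rows cols y hy (rows + cols) x hx]
    simp only [Int.toNat_natCast]
    rw [hgetU, lsB_of_le _ x rows (rows + cols) (by omega) (by omega)]
  rw [h1, h2, h3, h4]

-- ---- lockstep invariant between A's BFS and B's level BFS ----

def InvGood (rows cols : Nat) (v : List (List Int)) (front nxt : List (Nat × Nat))
    (seen : PySem.Set (Nat × Nat)) (level : Int) : Prop :=
  v.length = rows ∧ (∀ row ∈ v, row.length = cols) ∧
  (∀ x y, 0 ≤ vget v x y) ∧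
  (∀ p ∈ front, p.1 < rows ∧ p.2 < cols ∧ vget v p.1 p.2 = level + 1) ∧
  (∀ p ∈ nxt, p.1 < rows ∧ p.2 < cols ∧ vget v p.1 p.2 = level + 2) ∧
  (∀ x y, ((x, y) ∈ seen) ↔ vget v x y ≠ 0) ∧
  0 ≤ level ∧ seen.Nodup ∧ (∀ p ∈ seen, p.1 < rows ∧ p.2 < cols)

theorem step_eq (board : List String) (rows cols : Nat) (x y : Nat)
    (hx : x < rows) (hy : y < cols) :
    ∀ (dirs : List (Int × Int)) (rest nxt : List (Nat × Nat)) (v : List (List Int))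
      (seen : PySem.Set (Nat × Nat)) (level : Int),
    InvGood rows cols v rest nxt seen level → vget v x y = level + 1 →
    (∃ r, stepA board rows cols x y dirs (rest ++ nxt) v = .inr r ∧
      visitNbrs board (dirs.map (nbrF board rows cols x y)) nxt seen level = .inr r) ∨
    (∃ nxt' seen' v', stepA board rows cols x y dirs (rest ++ nxt) v = .inl (rest ++ nxt', v') ∧
      visitNbrs board (dirs.map (nbrF board rows cols x y)) nxt seen level = .inl (nxt', seen') ∧
      InvGood rows cols v' rest nxt' seen' level ∧
      seen'.length + nxt.length = seen.length + nxt'.length) := by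
  intro dirs
  induction dirs with
  | nil =>
    intro rest nxt v seen level hInv hv
    right
    exact ⟨nxt, seen, v, rfl, rfl, hInv, by omega⟩
  | cons dd ds ih =>
    intro rest nxt v seen level hInv hv
    obtain ⟨ddx, ddy⟩ := dd
    obtain ⟨hlen, hrows, hnn, hfr, hnx, hseen, hlev, hnd, hsb⟩ := hInv
    have hb := slide_bounds board rows cols ddx ddy (rows + cols) (x : Int) (y : Int)
      (Int.natCast_nonneg x) (by exact_mod_cast hx) (Int.natCast_nonneg y) (by exact_mod_cast hy)
    rw [stepA]
    set p := slideA board rows cols ddx ddy (x : Int) (y : Int) (rows + cols) with hp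
    have hnb : nbrF board rows cols x y (ddx, ddy) = (p.1.toNat, p.2.toNat) := rfl
    rw [List.map_cons, visitNbrs]
    simp only [hnb, ← cellA_def]
    set nxn := p.1.toNat
    set nyn := p.2.toNat
    have hnxr : nxn < rows := by omega
    have hnyc : nyn < cols := by omega
    have hrowlen : (v.getD nxn []).length = cols := by
      have hm : v.getD nxn [] ∈ v := by
        rw [List.getD_eq_getElem?_getD, List.getElem?_eq_getElem (by omega)]
        exact List.getElem_mem (by omega)
      exact hrows _ hm
    have hvx0 : vget v x y ≠ 0 := by
      rw [hv]; intro h; omega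
    by_cases h0 : vget v nxn nyn = 0
    · by_cases hG : cellA board nxn nyn = 'G'
      · rw [if_neg (by simp [hG]), if_pos ⟨h0, hG⟩, if_neg (by rw [hseen]; simp [h0]),
          if_pos hG]
        exact .inl ⟨level + 1, by rw [hv], rfl⟩
      · rw [if_pos ⟨h0, hG⟩, if_neg (by rw [hseen]; simp [h0]), if_neg hG]
        have hparent_ne : x ≠ nxn ∨ y ≠ nyn := by
          by_contra hc
          push Not at hc
          exact hvx0 (by rw [hc.1, hc.2]; exact h0)
        have hself : vget (vset v nxn nyn (vget v x y + 1)) nxn nyn = vget v x y + 1 :=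
          vget_vset_self _ _ _ _ (by omega) (by omega)
        have hvx : vget (vset v nxn nyn (vget v x y + 1)) x y = vget v x y :=
          vget_vset_ne _ _ _ _ _ _ (by tauto)
        have hInv' : InvGood rows cols (vset v nxn nyn (vget v x y + 1)) rest
            (nxt ++ [(nxn, nyn)]) (PySem.Set.add seen (nxn, nyn)) level := by
          refine ⟨by rw [vset_length]; exact hlen, vset_rows _ _ _ _ _ hrows, ?_, ?_, ?_, ?_,
            hlev, PySem.Set.nodup_add _ _ hnd, ?_⟩
          · intro a b
            by_cases hab : a = nxn ∧ b = nyn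
            · rw [hab.1, hab.2, hself]
              have := hnn x y
              omega
            · rw [vget_vset_ne _ _ _ _ _ _ (by tauto)]
              exact hnn a b
          · intro q hq
            obtain ⟨hq1, hq2, hq3⟩ := hfr q hq
            have hne : nxn ≠ q.1 ∨ nyn ≠ q.2 := by
              by_contra hc
              push Not at hc
              rw [← hc.1, ← hc.2] at hq3
              rw [h0] at hq3
              omega
            exact ⟨hq1, hq2, by rw [vget_vset_ne _ _ _ _ _ _ hne]; exact hq3⟩
          · intro q hq
            rcases List.mem_append.mp hq with hq1 | hq1
            · obtain ⟨hq2, hq3, hq4⟩ := hnx q hq1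
              have hne : nxn ≠ q.1 ∨ nyn ≠ q.2 := by
                by_contra hc
                push Not at hc
                rw [← hc.1, ← hc.2] at hq4
                rw [h0] at hq4
                omega
              exact ⟨hq2, hq3, by rw [vget_vset_ne _ _ _ _ _ _ hne]; exact hq4⟩
            · have hq1' : q = (nxn, nyn) := by simpa using hq1
              subst hq1'
              exact ⟨hnxr, hnyc, by rw [hself, hv]; ring⟩
          · intro a b
            rw [PySem.Set.mem_add]
            by_cases hab : a = nxn ∧ b = nyn
            · rw [hab.1, hab.2, hself]
              constructor
              · intro _
                have := hnn x y
                omega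
              · intro _
                right
                rfl
            · have hne : nxn ≠ a ∨ nyn ≠ b := by tauto
              rw [vget_vset_ne _ _ _ _ _ _ hne, ← hseen]
              constructor
              · rintro (h | h)
                · exact h
                · exact absurd ⟨congrArg Prod.fst h, congrArg Prod.snd h⟩ hab
              · exact Or.inl
          · intro q hq
            rw [PySem.Set.mem_add] at hq
            rcases hq with hq | hq
            · exact hsb q hq
            · subst hq
              exact ⟨hnxr, hnyc⟩
        have hNotMem : (nxn, nyn) ∉ seen := by rw [hseen]; simp [h0]
        have hseenlen : (PySem.Set.add seen (nxn, nyn)).length = seen.length + 1 := by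
          rw [PySem.Set.add_of_not_mem hNotMem, List.length_append, List.length_cons,
            List.length_nil]
        rcases ih rest (nxt ++ [(nxn, nyn)]) (vset v nxn nyn (vget v x y + 1))
            (PySem.Set.add seen (nxn, nyn)) level hInv' (by rw [hvx]; exact hv) with
          ⟨r, hA, hB⟩ | ⟨nxt'', seen'', v'', hA, hB, hInv2, hlen2⟩
        · left
          refine ⟨r, ?_, hB⟩
          rw [← hA]
          congr 1
          rw [List.append_assoc]
        · right
          refine ⟨nxt'', seen'', v'', ?_, hB, hInv2, ?_⟩
          · rw [← hA]
            congr 1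
            rw [List.append_assoc]
          · simp only [List.length_append, List.length_cons, List.length_nil] at hlen2
            omega
    · rw [if_neg (by simp [h0]), if_neg (by simp [h0]), if_pos ((hseen _ _).mpr h0)]
      exact ih rest nxt v seen level ⟨hlen, hrows, hnn, hfr, hnx, hseen, hlev, hnd, hsb⟩ hv

theorem sweep_eq (board : List String) (rows cols : Nat) (tR tL tD tU : List (List Nat))
    (hT : ∀ x y, x < rows → y < cols →
      [(x, nget tR x y), (x, nget tL x y), (nget tD y x, y), (nget tU y x, y)] =
        dirsA.map (nbrF board rows cols x y)) :
    ∀ (front nxt : List (Nat × Nat)) (v : List (List Int)) (seen : PySem.Set (Nat × Nat))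
      (level : Int) (f : Nat),
    InvGood rows cols v front nxt seen level →
    (∃ r, sweep board tR tL tD tU front nxt seen level = .inr r ∧
      bfsA board rows cols (front ++ nxt) v (front.length + f) = r) ∨
    (∃ nxt' seen' v', sweep board tR tL tD tU front nxt seen level = .inl (nxt', seen') ∧
      bfsA board rows cols (front ++ nxt) v (front.length + f) = bfsA board rows cols nxt' v' f ∧
      InvGood rows cols v' [] nxt' seen' level ∧
      seen'.length + nxt.length = seen.length + nxt'.length) := by
  intro front
  induction front with
  | nil =>
    intro nxt v seen level f hInv
    obtain ⟨hlen, hrows, hnn, hfr, hnx, hseen, hlev, hnd, hsb⟩ := hInv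
    right
    refine ⟨nxt, seen, v, rfl, by simp, ?_, by omega⟩
    exact ⟨hlen, hrows, hnn, by simp, hnx, hseen, hlev, hnd, hsb⟩
  | cons hd rest ih =>
    intro nxt v seen level f hInv
    obtain ⟨x0, y0⟩ := hd
    obtain ⟨hx0, hy0, hv0⟩ := hInv.2.2.2.1 (x0, y0) List.mem_cons_self
    have hInv' : InvGood rows cols v rest nxt seen level := by
      obtain ⟨hlen, hrows, hnn, hfr, hnx, hseen, hlev, hnd, hsb⟩ := hInv
      exact ⟨hlen, hrows, hnn, fun p hp => hfr p (List.mem_cons_of_mem _ hp), hnx, hseen,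
        hlev, hnd, hsb⟩
    have hq : ((x0, y0) :: rest) ++ nxt = (x0, y0) :: (rest ++ nxt) := rfl
    have hf : ((x0, y0) :: rest).length + f = (rest.length + f) + 1 := by
      simp; omega
    rw [hq, hf, bfsA, sweep, hT x0 y0 hx0 hy0]
    rcases step_eq board rows cols x0 y0 hx0 hy0 dirsA rest nxt v seen level hInv' hv0 with
      ⟨r, hA, hB⟩ | ⟨nxt', seen', v', hA, hB, hInv2, hlen2⟩
    · left
      rw [hA, hB]
      exact ⟨r, rfl, rfl⟩
    · rw [hA, hB]
      rcases ih nxt' v' seen' level f hInv2 with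
        ⟨r, hS, hBF⟩ | ⟨nxt'', seen'', v'', hS, hBF, hInv3, hlen3⟩
      · left
        exact ⟨r, hS, hBF⟩
      · right
        exact ⟨nxt'', seen'', v'', hS, hBF, hInv3, by omega⟩

theorem seen_card (rows cols : Nat) (seen : List (Nat × Nat)) (hnd : seen.Nodup)
    (hb : ∀ p ∈ seen, p.1 < rows ∧ p.2 < cols) : seen.length ≤ rows * cols := by
  have hsub : seen ⊆ (List.range rows) ×ˢ (List.range cols) := by
    intro p hp
    exact List.mem_product.mpr ⟨List.mem_range.mpr (hb p hp).1, List.mem_range.mpr (hb p hp).2⟩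
  have hle := (hnd.subperm hsub).length_le
  simpa [List.length_product] using hle

theorem levels_eq (board : List String) (rows cols : Nat) (tR tL tD tU : List (List Nat))
    (hT : ∀ x y, x < rows → y < cols →
      [(x, nget tR x y), (x, nget tL x y), (nget tD y x, y), (nget tU y x, y)] =
        dirsA.map (nbrF board rows cols x y)) :
    ∀ (fB fA : Nat) (front : List (Nat × Nat)) (v : List (List Int))
      (seen : PySem.Set (Nat × Nat)) (level : Int),
    InvGood rows cols v front [] seen level →
    (front = [] → 1 ≤ fA ∧ 1 ≤ fB) →
    (front ≠ [] → rows * cols - seen.length + front.length + 1 ≤ fA ∧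
                  rows * cols - seen.length + 2 ≤ fB) →
    bfsA board rows cols front v fA = levels board tR tL tD tU front seen level fB := by
  intro fB
  induction fB with
  | zero =>
    intro fA front v seen level hInv h0 h1
    cases front with
    | nil => obtain ⟨-, hb⟩ := h0 rfl; omega
    | cons a l => obtain ⟨-, hb⟩ := h1 (by simp); omega
  | succ fB ih =>
    intro fA front v seen level hInv h0 h1
    cases front with
    | nil =>
      obtain ⟨hfa, -⟩ := h0 rfl
      obtain ⟨fA', rfl⟩ : ∃ fA', fA = fA' + 1 := ⟨fA - 1, by omega⟩
      rfl
    | cons hd rest =>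
      have hcard : seen.length ≤ rows * cols :=
        seen_card rows cols seen hInv.2.2.2.2.2.2.2.1 hInv.2.2.2.2.2.2.2.2
      obtain ⟨hfA, hfB⟩ := h1 (by simp)
      obtain ⟨f', hf'⟩ : ∃ f', fA = (hd :: rest).length + f' :=
        ⟨fA - (hd :: rest).length, by simp at hfA ⊢; omega⟩
      rw [hf']
      rcases sweep_eq board rows cols tR tL tD tU hT (hd :: rest) [] v seen level f' hInv with
        ⟨r, hS, hBF⟩ | ⟨nxt', seen', v', hS, hBF, hInv2, hlen2⟩
      · simp only [List.append_nil] at hBF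
        rw [hBF, levels, hS]
      · simp only [List.append_nil] at hBF
        rw [hBF, levels, hS]
        have hInv3 : InvGood rows cols v' nxt' [] seen' (level + 1) := by
          obtain ⟨hlen, hrows, hnn, hfr, hnx, hseen, hlev, hnd, hsb⟩ := hInv2
          refine ⟨hlen, hrows, hnn, ?_, by simp, hseen, by omega, hnd, hsb⟩
          intro p hp
          obtain ⟨hp1, hp2, hp3⟩ := hnx p hp
          exact ⟨hp1, hp2, by rw [hp3]; ring⟩
        have hslen : seen'.length = seen.length + nxt'.length := by
          simpa using hlen2
        have hcard' : seen'.length ≤ rows * cols :=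
          seen_card rows cols seen' hInv2.2.2.2.2.2.2.2.1 hInv2.2.2.2.2.2.2.2.2
        obtain ⟨rc, hrc⟩ : ∃ rc : Nat, rows * cols = rc := ⟨_, rfl⟩
        rw [hrc] at hfA hfB hcard hcard'
        have hA' : nxt' = [] → 1 ≤ f' ∧ 1 ≤ fB := by
          intro _
          constructor <;> omega
        have hB' : nxt' ≠ [] → rows * cols - seen'.length + nxt'.length + 1 ≤ f' ∧
            rows * cols - seen'.length + 2 ≤ fB := by
          intro hne
          have hpos : 0 < nxt'.length := List.length_pos_iff.mpr hne
          rw [hrc]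
          constructor <;> omega
        exact ih f' nxt' v' seen' (level + 1) hInv3 hA' hB' 

-- nonemptiness of the candidate list under Pre_
theorem cand_ne_nil (board : List String) (hPre : Pre_solution board) :
    (List.range board.length).flatMap (fun x =>
      (List.range ((board.headD "").toList.length)).filterMap (fun y =>
        if cellA board x y = 'R' then some (x, y) else none)) ≠ [] := by
  obtain ⟨-, -, s, hs, hR⟩ := hPre
  obtain ⟨xi, hxi, hsx⟩ := List.mem_iff_getElem.mp hs
  rw [List.mem_iff_getElem] at hR
  obtain ⟨yi, hyi, hsy⟩ := hR
  have htk : (s.toList.take ((board.headD "").toList.length)).length =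
      min ((board.headD "").toList.length) s.toList.length := List.length_take
  have hmem : (xi, yi) ∈ (List.range board.length).flatMap (fun x =>
      (List.range ((board.headD "").toList.length)).filterMap (fun y =>
        if cellA board x y = 'R' then some (x, y) else none)) := by
    rw [List.mem_flatMap]
    refine ⟨xi, List.mem_range.mpr hxi, ?_⟩
    rw [List.mem_filterMap]
    refine ⟨yi, List.mem_range.mpr (by omega), ?_⟩
    have hcell : cellA board xi yi = 'R' := by
      rw [List.getElem_take] at hsy
      rw [cellA, List.getD_eq_getElem?_getD, List.getD_eq_getElem?_getD (l := board),
        List.getElem?_eq_getElem hxi]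
      simp only [Option.getD_some, hsx]
      rw [List.getElem?_eq_getElem (by omega : yi < s.toList.length)]
      simp only [Option.getD_some]
      exact hsy
    rw [if_pos hcell]
  exact List.ne_nil_of_mem hmem

-- ===== VERDICT (by name: the statement is the Claim_ definition above) =====
theorem solution_spec : Claim_equal_solution := by
  intro board _hDom hPre
  unfold Spec_solution
  simp only [solution, solution_alt, ← cellA_def]
  have hfold : (List.range board.length).foldl (fun acc x =>
      (List.range ((board.headD "").toList.length)).foldl
        (fun acc y => if cellA board x y = 'R' then some (x, y) else acc) acc)
      (none : Option (Nat × Nat)) =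
      ((List.range board.length).flatMap (fun x =>
        (List.range ((board.headD "").toList.length)).filterMap (fun y =>
          if cellA board x y = 'R' then some (x, y) else none))).getLast? := by
    have hinner : (fun (acc : Option (Nat × Nat)) (x : Nat) =>
        (List.range ((board.headD "").toList.length)).foldl
          (fun acc y => if cellA board x y = 'R' then some (x, y) else acc) acc) =
        (fun acc x => (((List.range ((board.headD "").toList.length)).filterMap
          (fun y => if cellA board x y = 'R' then some (x, y) else none)).getLast?).or acc) := by
      funext acc x
      exact foldl_if_last _ (fun y => cellA board x y = 'R') (fun y => (x, y)) acc
    rw [hinner, foldl_or_last, Option.or_none]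
    exact getLast?_filterMap_getLast? _ _
  rw [hfold]
  have hne := cand_ne_nil board hPre
  obtain ⟨pr, hlast⟩ : ∃ pr, ((List.range board.length).flatMap (fun x =>
      (List.range ((board.headD "").toList.length)).filterMap (fun y =>
        if cellA board x y = 'R' then some (x, y) else none))).getLast? = some pr := by
    cases h : ((List.range board.length).flatMap (fun x =>
        (List.range ((board.headD "").toList.length)).filterMap (fun y =>
          if cellA board x y = 'R' then some (x, y) else none))).getLast? with
    | none => exact absurd (List.getLast?_eq_none_iff.mp h) hne
    | some pr => exact ⟨pr, rfl⟩
  obtain ⟨rx, ry⟩ := pr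
  have hmem := List.mem_of_getLast? hlast
  rw [List.mem_flatMap] at hmem
  obtain ⟨x', hx', hmem2⟩ := hmem
  rw [List.mem_filterMap] at hmem2
  obtain ⟨y', hy', heq⟩ := hmem2
  have hbounds : rx < board.length ∧ ry < (board.headD "").toList.length := by
    by_cases hc : cellA board x' y' = 'R'
    · rw [if_pos hc, Option.some_inj] at heq
      have h1 : x' = rx := congrArg Prod.fst heq
      have h2 : y' = ry := congrArg Prod.snd heq
      exact ⟨h1 ▸ List.mem_range.mp hx', h2 ▸ List.mem_range.mp hy'⟩
    · rw [if_neg hc] at heq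
      exact absurd heq (by simp)
  obtain ⟨-, hrowsle, -⟩ := hPre
  have hP : ∀ x, x < board.length →
      (board.headD "").toList.length ≤ (board.getD x "").toList.length := by
    intro x hx
    apply hrowsle
    rw [List.getD_eq_getElem?_getD, List.getElem?_eq_getElem hx]
    exact List.getElem_mem hx
  -- initial visited grid facts
  have h0rows : ∀ row ∈ (List.range board.length).map
      (fun _ => (List.range ((board.headD "").toList.length)).map (fun _ => (0 : Int))),
      row.length = (board.headD "").toList.length := by
    intro row hr
    rw [List.mem_map] at hr
    obtain ⟨-, -, hr2⟩ := hr
    rw [← hr2]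
    simp
  have h0len : ((List.range board.length).map
      (fun _ => (List.range ((board.headD "").toList.length)).map (fun _ => (0 : Int)))).length =
      board.length := by simp
  have hlen0 : (((List.range board.length).map
      (fun _ => (List.range ((board.headD "").toList.length)).map
        (fun _ => (0 : Int)))).getD rx []).length = (board.headD "").toList.length := by
    apply h0rows
    rw [List.getD_eq_getElem?_getD, List.getElem?_eq_getElem (by omega)]
    exact List.getElem_mem _
  have hself : vget (vset ((List.range board.length).map
      (fun _ => (List.range ((board.headD "").toList.length)).map (fun _ => (0 : Int))))
      rx ry 1) rx ry = 1 :=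
    vget_vset_self _ _ _ _ (by omega) (by omega)
  have hother : ∀ a b, ¬(a = rx ∧ b = ry) → vget (vset ((List.range board.length).map
      (fun _ => (List.range ((board.headD "").toList.length)).map (fun _ => (0 : Int))))
      rx ry 1) a b = 0 := by
    intro a b hab
    rw [vget_vset_ne _ _ _ _ _ _ (by tauto)]
    exact vget_init _ _ _ _
  have hofl : PySem.Set.ofList [(rx, ry)] = [(rx, ry)] := rfl
  have hInvInit : InvGood board.length ((board.headD "").toList.length)
      (vset ((List.range board.length).map
        (fun _ => (List.range ((board.headD "").toList.length)).map (fun _ => (0 : Int))))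
        rx ry 1)
      [(rx, ry)] [] (PySem.Set.ofList [(rx, ry)]) 0 := by
    rw [hofl]
    refine ⟨by rw [vset_length]; exact h0len, vset_rows _ _ _ _ _ h0rows, ?_, ?_, by simp,
      ?_, le_refl 0, by simp, ?_⟩
    · intro a b
      by_cases hab : a = rx ∧ b = ry
      · rw [hab.1, hab.2, hself]
        omega
      · rw [hother a b hab]
    · intro p hp
      have hp' : p = (rx, ry) := by simpa using hp
      subst hp'
      refine ⟨hbounds.1, hbounds.2, ?_⟩
      rw [hself]
      norm_num
    · intro a b
      by_cases hab : a = rx ∧ b = ry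
      · rw [hab.1, hab.2, hself]
        simp
      · rw [hother a b hab]
        simp only [List.mem_singleton, Prod.mk.injEq]
        constructor
        · intro h
          exact absurd h hab
        · intro h
          exact absurd rfl h
    · intro p hp
      have hp' : p = (rx, ry) := by simpa using hp
      subst hp'
      exact hbounds
  have hrc1 : 1 ≤ board.length * ((board.headD "").toList.length) := by
    have := Nat.mul_le_mul (show 1 ≤ board.length by omega)
      (show 1 ≤ (board.headD "").toList.length by omega)
    simpa using this
  have hmain : bfsA board board.length ((board.headD "").toList.length) [(rx, ry)]
      (vset ((List.range board.length).map
        (fun _ => (List.range ((board.headD "").toList.length)).map (fun _ => (0 : Int))))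
        rx ry 1)
      (board.length * ((board.headD "").toList.length) + 1) =
      levels board (tblR board board.length ((board.headD "").toList.length))
        (tblL board board.length ((board.headD "").toList.length))
        (tblD board board.length ((board.headD "").toList.length))
        (tblU board board.length ((board.headD "").toList.length))
        [(rx, ry)] (PySem.Set.ofList [(rx, ry)]) 0
        (board.length * ((board.headD "").toList.length) + 1) := by
    apply levels_eq board board.length ((board.headD "").toList.length) _ _ _ _
      (nbrs_eq board board.length ((board.headD "").toList.length) hP)
      (board.length * ((board.headD "").toList.length) + 1)
      (board.length * ((board.headD "").toList.length) + 1)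
      [(rx, ry)] _ (PySem.Set.ofList [(rx, ry)]) 0 hInvInit
    · intro h
      simp at h
    · intro _
      rw [hofl]
      obtain ⟨rc, hrc⟩ : ∃ rc : Nat, board.length * ((board.headD "").toList.length) = rc :=
        ⟨_, rfl⟩
      rw [hrc] at hrc1 ⊢
      simp only [List.length_cons, List.length_nil]
      constructor <;> omega
  split
  · next heq =>
    rw [hlast] at heq
    exact absurd heq (by simp)
  · next rx' ry' heq =>
    rw [hlast] at heq
    obtain ⟨h1, h2⟩ : rx = rx' ∧ ry = ry' := by
      have := Option.some_inj.mp heq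
      exact ⟨congrArg Prod.fst this, congrArg Prod.snd this⟩
    subst h1
    subst h2
    split
    · next heqB =>
      have hAB : ((List.range board.length).flatMap (fun x =>
          (List.range ((board.headD "").toList.length)).filterMap (fun y =>
            if cellA board x y = 'R' then some (x, y) else none))).getLast? = none := heqB
      rw [hlast] at hAB
      exact absurd hAB (by simp)
    · next sx sy heqB =>
      have hAB : ((List.range board.length).flatMap (fun x =>
          (List.range ((board.headD "").toList.length)).filterMap (fun y =>
            if cellA board x y = 'R' then some (x, y) else none))).getLast? =
          some (sx, sy) := heqB
      rw [hlast] at hAB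
      obtain ⟨h3, h4⟩ : rx = sx ∧ ry = sy := by
        have := Option.some_inj.mp hAB
        exact ⟨congrArg Prod.fst this, congrArg Prod.snd this⟩
      subst h3
      subst h4
      exact hmain
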